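-- pv_equiv track=rewrite | github.com/projectkorea/akashic-md | 다른소스/3.py | solution
-- ===== SOURCE A (Python) =====
-- def solution(n):
--   s = []
--   num = 0
--   while n> 0: # 1. n번째수를 2진수로 표현
--     s.append(n%2)
--     n //=2
--   for i in range(len(s)): # 2. 2진수를 3의 거듭제곱합으로 변환
--     if s[i] == 1:
--       num += 3 ** i
--   return num
-- ===== SOURCE B (Python) =====
-- def solution(n):
--     # simpler: one recursion peels the low binary digit and scales by 3
--     if n <= 0:
--         return 0
--     return n % 2 + 3 * solution(n // 2)
-- ===== Notes on version B (the rewrite author's own statement) =====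
-- stated objective: simpler
-- what changed: Replaced A's two sequential loops (build the binary-digit list, then scan it by index summing 3**i) with a single direct recursion n%2 + 3*solution(n//2) and no intermediate list.
import Mathlib
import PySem

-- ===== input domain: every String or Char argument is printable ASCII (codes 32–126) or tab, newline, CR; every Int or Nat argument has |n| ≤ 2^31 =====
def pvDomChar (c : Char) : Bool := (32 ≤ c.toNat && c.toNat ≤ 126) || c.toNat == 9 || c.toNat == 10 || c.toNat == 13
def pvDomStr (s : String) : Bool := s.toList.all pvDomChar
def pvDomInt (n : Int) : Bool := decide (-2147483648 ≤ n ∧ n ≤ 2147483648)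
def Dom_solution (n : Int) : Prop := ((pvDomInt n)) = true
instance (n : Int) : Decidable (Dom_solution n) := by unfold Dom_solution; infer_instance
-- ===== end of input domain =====

-- B replaces A's two loops (build binary-digit list, then index it summing 3**i)
-- with one direct recursion; objective: simpler.

-- ===== PORT A =====
-- the while loop: append n%2, n //= 2, while n > 0
def solutionBuild (n : Int) : List Int :=
  if _h : 0 < n then
    PySem.Int.mod n 2 :: solutionBuild (PySem.Int.floordiv n 2)
  else []
termination_by n.toNat
decreasing_by
  have h2 : PySem.Int.floordiv n 2 = n / 2 := PySem.Int.floordiv_eq_ediv_of_pos (by omega)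
  rw [h2]; omega

def solution (n : Int) : Int :=
  -- s := solutionBuild n; then: for i in range(len(s)): if s[i] == 1: num += 3 ** i
  -- (i ≥ 0 always, so Python's 3**i is exactly 3 ^ i.toNat)
  (PySem.List.pyRange 0 ((solutionBuild n).length : Int) 1).foldl
    (fun num i => if PySem.List.pyGetD (solutionBuild n) i 0 == 1 then num + 3 ^ i.toNat else num) 0

-- ===== PORT B =====
def solution_alt (n : Int) : Int :=
  if _h : n ≤ 0 then 0
  else PySem.Int.mod n 2 + 3 * solution_alt (PySem.Int.floordiv n 2)
termination_by n.toNat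
decreasing_by
  have h2 : PySem.Int.floordiv n 2 = n / 2 := PySem.Int.floordiv_eq_ediv_of_pos (by omega)
  rw [h2]; omega

-- ===== PRECONDITION & SPEC =====
def Spec_solution (n : Int) (out : Int) : Prop := out = solution_alt n
instance (n : Int) (out : Int) : Decidable (Spec_solution n out) := by unfold Spec_solution; infer_instance

-- ===== CLAIM (what is proved, stated in full; the proofs are below) =====
def Claim_equal_solution : Prop := ∀ (n : Int), Dom_solution n → Spec_solution n (solution n)

-- ===== LEMMAS AND PROOFS =====

-- recursive characterisation of A's second loop on the digit list
def pvVal : List Int → Int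
  | [] => 0
  | a :: l => (if a == 1 then 1 else 0) + 3 * pvVal l

lemma pvFoldl_val (s : List Int) : ∀ (init : Int) (j : Nat),
    (List.range s.length).foldl
      (fun num k => if s.getD k 0 == 1 then num + 3 ^ (k + j) else num) init
      = init + 3 ^ j * pvVal s := by
  induction s with
  | nil => intro init j; simp [pvVal]
  | cons a l ih =>
    intro init j
    rw [List.length_cons, List.range_succ_eq_map, List.foldl_cons, List.foldl_map]
    simp only [Nat.succ_eq_add_one]
    simp only [List.getD_cons_succ]
    have harr : ∀ k : Nat, k + 1 + j = k + (j + 1) := fun k => by omega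
    simp only [harr]
    rw [ih]
    simp only [pvVal, List.getD_cons_zero]
    by_cases ha : a == 1 <;> simp [ha] <;> ring

lemma pvFoldl_val0 (s : List Int) :
    (List.range s.length).foldl
      (fun num k => if s.getD k 0 == 1 then num + 3 ^ k else num) 0 = pvVal s := by
  have h := pvFoldl_val s 0 0
  simpa using h

lemma solution_eq_val (n : Int) : solution n = pvVal (solutionBuild n) := by
  unfold solution
  rw [PySem.List.pyRange_one]
  simp only [sub_zero, Int.toNat_natCast, zero_add, List.foldl_map,
    PySem.List.pyGetD_natCast, Int.toNat_natCast]
  exact pvFoldl_val0 (solutionBuild n)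

lemma val_build (n : Int) : pvVal (solutionBuild n) = solution_alt n := by
  by_cases h : 0 < n
  · rw [solutionBuild, solution_alt]
    have hn2 : 0 ≤ PySem.Int.floordiv n 2 := by
      rw [PySem.Int.floordiv_eq_ediv_of_pos (by omega)]; omega
    have ih := val_build (PySem.Int.floordiv n 2)
    simp only [dif_pos h, dif_neg (by omega : ¬ n ≤ 0), pvVal, ih]
    have hm : PySem.Int.mod n 2 = n % 2 := PySem.Int.mod_eq_emod_of_pos (by omega)
    have h01 : n % 2 = 0 ∨ n % 2 = 1 := by omega
    rcases h01 with h0 | h1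
    · simp [h0]
    · simp [h1]
  · rw [solutionBuild, solution_alt]
    simp [h, pvVal, (show n ≤ 0 by omega)]
termination_by n.toNat
decreasing_by
  have h2 : PySem.Int.floordiv n 2 = n / 2 := PySem.Int.floordiv_eq_ediv_of_pos (by omega)
  rw [h2]; omega

-- ===== VERDICT (by name: the statement is the Claim_ definition above) =====
theorem solution_spec : Claim_equal_solution := by
  intro n _
  unfold Spec_solution
  rw [solution_eq_val, val_build]
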